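-- pv_equiv track=rewrite | github.com/vasyl-d/OOP_course1 | Gjango/ex38.py | res_common_let
-- ===== SOURCE A (Python) =====
-- def res_common_let(a):
--     # выделил общие уникальные буквы, сделал их частоты по словам и вывел в списк с минимальной частотой. отсортировал
--     uniq_common_leters = set(a[0])
--
--     for i in range(1, len(a)):
--         uniq_common_leters.intersection_update(set(a[i]))
--
--     dict_3 = {l:{w.count(l) for w in a} for l in uniq_common_leters}
--
--     res = []
--     for el in dict_3.keys():
--         res.extend([el]*min(dict_3[el]))
--
--     return sorted(res)
-- ===== SOURCE B (Python) =====
-- def res_common_let(a):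
--     # One fused fold: keep a running {letter: min count so far} counter,
--     # intersecting it with each word's tally; no separate phases.
--     def tally(w):
--         t = {}
--         for ch in w:
--             t[ch] = t.get(ch, 0) + 1
--         return t
--     c = tally(a[0])
--     for w in a[1:]:
--         d = tally(w)
--         c = {k: min(v, d[k]) for k, v in c.items() if k in d}
--     out = []
--     for k, v in c.items():
--         out += [k] * v
--     return sorted(out)
-- ===== Notes on version B (the rewrite author's own statement) =====
-- stated objective: alternative
-- what changed: Replaces A's three phases (set-intersection for common letters, a dict mapping each letter to the set of its per-word counts, then a loop taking min over each set) by one fused fold that maintains a running {letter: min count} counter intersected with each word's tally.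
import Mathlib
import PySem

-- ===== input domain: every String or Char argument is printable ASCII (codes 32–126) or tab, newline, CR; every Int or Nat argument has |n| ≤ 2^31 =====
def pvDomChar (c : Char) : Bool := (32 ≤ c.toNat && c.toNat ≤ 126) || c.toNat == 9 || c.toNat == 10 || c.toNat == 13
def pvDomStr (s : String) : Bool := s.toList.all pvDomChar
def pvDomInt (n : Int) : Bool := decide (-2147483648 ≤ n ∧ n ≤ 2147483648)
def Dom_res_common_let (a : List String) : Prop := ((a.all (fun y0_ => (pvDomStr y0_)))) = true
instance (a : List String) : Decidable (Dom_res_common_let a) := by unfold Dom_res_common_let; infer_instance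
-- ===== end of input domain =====

-- B replaces A's three phases by one fused fold over a running min-counter (an alternative algorithm, not measured faster).

-- ===== PORT A =====
def res_common_let (a : List String) : List String :=
  -- uniq_common_leters = set(a[0]); for i in range(1, len(a)): intersection_update(set(a[i]))
  let uniq : PySem.Set Char :=
    (PySem.List.pyRange 1 (a.length : Int) 1).foldl
      (fun s i => PySem.Set.inter s (PySem.Set.ofList (PySem.List.pyGetD a i "").toList))
      (PySem.Set.ofList (PySem.List.pyGetD a 0 "").toList)
  -- dict_3 = {l : {w.count(l) for w in a} for l in uniq}
  let dict3 : PySem.Dict Char (PySem.Set Int) :=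
    uniq.foldl
      (fun d l => d.insert l (PySem.Set.ofList (a.map (fun w => (w.toList.count l : Int)))))
      PySem.Dict.empty
  -- res = []; for el in dict_3.keys(): res.extend([el] * min(dict_3[el]))
  let res : List Char :=
    dict3.keys.foldl
      (fun acc el =>
        acc ++ List.replicate ((PySem.List.min? (dict3.getD el []) (fun x => x)).getD 0).toNat el)
      []
  -- return sorted(res): single-character strings sort exactly as their characters
  (PySem.List.sorted res (fun x => x) false).map (fun ch => String.ofList [ch])

-- ===== PORT B =====
-- tally(w): t = {}; for ch in w: t[ch] = t.get(ch, 0) + 1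
def pvTally (w : List Char) : PySem.Dict Char Int :=
  w.foldl (fun t ch => t.insert ch (t.getD ch 0 + 1)) PySem.Dict.empty

def res_common_let_alt (a : List String) : List String :=
  -- c = tally(a[0]); for w in a[1:]: d = tally(w); c = {k: min(v, d[k]) for k, v in c.items() if k in d}
  let c : PySem.Dict Char Int :=
    (a.drop 1).foldl
      (fun c w =>
        let d := pvTally w.toList
        c.items.foldl
          (fun r kv => if d.contains kv.1 then r.insert kv.1 (min kv.2 (d.getD kv.1 0)) else r)
          PySem.Dict.empty)
      (pvTally (a.headD "").toList)
  -- out = []; for k, v in c.items(): out += [k] * v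
  let out : List Char := c.items.foldl (fun acc kv => acc ++ List.replicate kv.2.toNat kv.1) []
  -- return sorted(out)
  (PySem.List.sorted out (fun x => x) false).map (fun ch => String.ofList [ch])

-- ===== PRECONDITION & SPEC =====
-- Pre_ excludes only the empty list, on which A's a[0] raises IndexError (B raises there too).
def Pre_res_common_let (a : List String) : Prop := a ≠ []
instance (a : List String) : Decidable (Pre_res_common_let a) := by unfold Pre_res_common_let; infer_instance
def pvWitness_res_common_let : List String := ["abacus", "banana", "cabal"]
def Spec_res_common_let (a : List String) (out : List String) : Prop := out = res_common_let_alt a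
instance (a : List String) (out : List String) : Decidable (Spec_res_common_let a out) := by unfold Spec_res_common_let; infer_instance

-- ===== CLAIM (what is proved, stated in full; the proofs are below) =====
def Claim_equal_res_common_let : Prop := ∀ (a : List String), Dom_res_common_let a → Pre_res_common_let a → Spec_res_common_let a (res_common_let a)

-- ===== LEMMAS AND PROOFS =====

-- L2
theorem pvTally_eq_counter (w : List Char) : pvTally w = PySem.Dict.counter w :=
  PySem.Dict.foldl_insert_getD_add_one_eq_counter w

-- L1: conditional insert fold over pairs with distinct keys, into an empty dict
theorem items_foldl_if_insert (ps : List (Char × Int)) (p : Char × Int → Bool) (g : Char × Int → Int)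
    (hnd : (ps.map Prod.fst).Nodup) :
    (ps.foldl (fun r kv => if p kv then r.insert kv.1 (g kv) else r) PySem.Dict.empty).items
      = (ps.filter p).map (fun kv => (kv.1, g kv)) := by
  rw [PySem.List.foldl_if_eq_foldl_filter]
  rw [PySem.Dict.items_foldl_insert_fresh (k := Prod.fst) (v := g)]
  · simp [PySem.Dict.empty]
  · intro a _; simp [PySem.Dict.contains_empty]
  · exact (((List.filter_sublist (l := ps)).map Prod.fst).nodup hnd)

-- L4: min over the set of a nonempty list of ints = running min over the list
theorem min_ofList_cons (x : Int) (xs : List Int) :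
    (PySem.List.min? (PySem.Set.ofList (x :: xs)) (fun y => y)).getD 0 = xs.foldl min x := by
  rw [PySem.Set.ofList_cons, PySem.List.min?_id_cons]
  have h1 := PySem.List.foldl_min_le (PySem.Set.discard (PySem.Set.ofList xs) x) x
  have h2 := PySem.List.foldl_min_le xs x
  have m1 := PySem.List.foldl_min_mem (PySem.Set.discard (PySem.Set.ofList xs) x) x
  have m2 := PySem.List.foldl_min_mem xs x
  simp only [Option.getD_some]
  apply le_antisymm
  · rcases m2 with h | h
    · rw [h]; exact h1.1
    · by_cases hx : xs.foldl min x = x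
      · rw [hx]; exact h1.1
      · exact h1.2 _ (by rw [PySem.Set.mem_discard]; exact ⟨(PySem.Set.mem_ofList _ _).2 h, hx⟩)
  · rcases m1 with h | h
    · rw [h]; exact h2.1
    · exact h2.2 _ ((PySem.Set.mem_ofList _ _).1 ((PySem.Set.mem_discard _ _ _).1 h).1)

-- nodup of the A-side intersection fold
theorem nodup_afold (t : List String) (s : PySem.Set Char) (hs : s.Nodup) :
    (t.foldl (fun s w => PySem.Set.inter s (PySem.Set.ofList w.toList)) s).Nodup := by
  induction t generalizing s with
  | nil => exact hs
  | cons w t ih => exact ih _ (PySem.Set.nodup_inter _ _ hs)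

theorem ofList_contains {α : Type} [BEq α] [LawfulBEq α] (xs : List α) (y : α) :
    (PySem.Set.ofList xs).contains y = xs.contains y := by
  simp [PySem.Set.contains_eq_listContains, PySem.Set.mem_ofList]

-- the loop invariant: B's running counter lists exactly the common letters so far, each with its min count
theorem pv_inv (c0 : List Char) (t : List String) :
    (t.foldl
      (fun c w =>
        let d := pvTally w.toList
        c.items.foldl
          (fun r kv => if d.contains kv.1 then r.insert kv.1 (min kv.2 (d.getD kv.1 0)) else r)
          PySem.Dict.empty)
      (pvTally c0)).items
    = (t.foldl (fun s w => PySem.Set.inter s (PySem.Set.ofList w.toList)) (PySem.Set.ofList c0)).map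
        (fun k => (k, (t.map (fun w => (w.toList.count k : Int))).foldl min (c0.count k : Int))) := by
  induction t using List.reverseRecOn with
  | nil =>
      rw [pvTally_eq_counter]
      simpa using PySem.Dict.items_counter c0
  | append_singleton t w ih =>
      rw [List.foldl_append, List.foldl_append]
      simp only [List.foldl_cons, List.foldl_nil]
      rw [items_foldl_if_insert _ _ _ (by
        rw [ih, List.map_map]
        have : (Prod.fst ∘ fun k : Char => (k, (t.map (fun w => (w.toList.count k : Int))).foldl min (c0.count k : Int))) = id := rfl
        rw [this, List.map_id]
        exact nodup_afold t (PySem.Set.ofList c0) (PySem.Set.nodup_ofList c0))]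
      rw [ih, List.filter_map, List.map_map]
      simp only [PySem.Set.inter, List.map_append, List.foldl_append, pvTally_eq_counter, PySem.Dict.contains_counter, PySem.Dict.getD_counter]
      simp only [ofList_contains, Function.comp_def, List.map_cons, List.map_nil,
        List.foldl_cons, List.foldl_nil]

theorem pv_mid (h : String) (t : List String) :
    (let uniq : PySem.Set Char :=
      t.foldl (fun s w => PySem.Set.inter s (PySem.Set.ofList w.toList)) (PySem.Set.ofList h.toList)
     let dict3 : PySem.Dict Char (PySem.Set Int) :=
      uniq.foldl (fun d l => d.insert l (PySem.Set.ofList ((h :: t).map (fun w => (w.toList.count l : Int))))) PySem.Dict.empty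
     dict3.keys.foldl
      (fun acc el =>
        acc ++ List.replicate ((PySem.List.min? (dict3.getD el []) (fun x => x)).getD 0).toNat el)
      [])
    = (t.foldl
        (fun c w =>
          let d := pvTally w.toList
          c.items.foldl
            (fun r kv => if d.contains kv.1 then r.insert kv.1 (min kv.2 (d.getD kv.1 0)) else r)
            PySem.Dict.empty)
        (pvTally h.toList)).items.foldl (fun acc kv => acc ++ List.replicate kv.2.toNat kv.1) [] := by
  simp only []
  have hU : (t.foldl (fun s w => PySem.Set.inter s (PySem.Set.ofList w.toList))
      (PySem.Set.ofList h.toList)).Nodup := nodup_afold t _ (PySem.Set.nodup_ofList _)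
  generalize hUdef : t.foldl (fun s w => PySem.Set.inter s (PySem.Set.ofList w.toList))
      (PySem.Set.ofList h.toList) = U at *
  rw [pv_inv, hUdef]
  have hitems : (U.foldl (fun d l => d.insert l
        (PySem.Set.ofList ((h :: t).map (fun w => (w.toList.count l : Int))))) PySem.Dict.empty).items
      = U.map (fun l => (l, PySem.Set.ofList ((h :: t).map (fun w => (w.toList.count l : Int))))) := by
    rw [PySem.Dict.items_foldl_insert_fresh (k := fun l => l)
      (v := fun l => PySem.Set.ofList ((h :: t).map (fun w => (w.toList.count l : Int))))]
    · rfl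
    · intro a _; exact PySem.Dict.contains_empty _
    · simpa using hU
  have hkeys : (U.foldl (fun d l => d.insert l
        (PySem.Set.ofList ((h :: t).map (fun w => (w.toList.count l : Int))))) PySem.Dict.empty).keys = U := by
    simp only [PySem.Dict.keys, hitems, List.map_map]; exact List.map_id U
  rw [hkeys]
  rw [PySem.List.foldl_append_eq_flatMap, PySem.List.foldl_append_eq_flatMap, List.flatMap_map,
    List.nil_append, List.nil_append]
  rw [List.flatMap_def, List.flatMap_def]
  congr 1
  apply List.map_congr_left
  intro el hel
  have hmem : (el, PySem.Set.ofList ((h :: t).map (fun w => (w.toList.count el : Int))))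
      ∈ (U.foldl (fun d l => d.insert l
        (PySem.Set.ofList ((h :: t).map (fun w => (w.toList.count l : Int))))) PySem.Dict.empty).items := by
    rw [hitems]; exact List.mem_map_of_mem hel
  have hnd : (U.foldl (fun d l => d.insert l
        (PySem.Set.ofList ((h :: t).map (fun w => (w.toList.count l : Int))))) PySem.Dict.empty).keys.Nodup := by
    rw [hkeys]; exact hU
  rw [PySem.Dict.getD_of_mem_items _ hmem hnd]
  simp only [List.map_cons, min_ofList_cons]

-- ===== VERDICT (by name: the statement is the Claim_ definition above) =====
theorem res_common_let_spec : Claim_equal_res_common_let := by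
  intro a _ hpre
  unfold Spec_res_common_let
  match a with
  | [] => exact absurd rfl hpre
  | h :: t =>
    unfold res_common_let res_common_let_alt
    rw [PySem.List.foldl_pyRange_pyGetD' (h :: t) "" (fun s w => PySem.Set.inter s (PySem.Set.ofList w.toList)) _ (a := 1) (by norm_num)]
    simp only [List.headD_cons, PySem.List.pyGetD_ofNat', Int.toNat_one, List.drop_succ_cons, List.drop_zero, List.getD_cons_zero]
    rw [pv_mid]
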